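-- pv_equiv track=rewrite | github.com/hesh64/Algos | algos/01.knapsack/01.knapsack.py | weight_combos
-- ===== SOURCE A (Python) =====
-- def weight_combos(weights, target, idx=0):
--     if idx == len(weights):
--         return [[]]
--
--     empty = weight_combos(weights, target=target, idx=idx + 1)
--     not_empty = []
--     for arr in empty:
--         copy = arr.copy()
--         copy.append(weights[idx])
--         if sum(copy) <= target:
--             not_empty.append(copy)
--
--     empty.extend(not_empty)
--     return empty
-- ===== SOURCE B (Python) =====
-- def weight_combos(weights, target, idx=0):
--     result = [[]]
--     for i in range(len(weights) - 1, idx - 1, -1):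
--         result = result + [arr + [weights[i]] for arr in result if sum(arr) + weights[i] <= target]
--     return result
-- ===== Notes on version B (the rewrite author's own statement) =====
-- stated objective: alternative
-- what changed: Replaced A's top-down recursion (one stack frame per index, rebuilding via an inner append loop) with a single bottom-up loop from the last index down to idx that extends an accumulator list with filtered one-element extensions.
import Mathlib
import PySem

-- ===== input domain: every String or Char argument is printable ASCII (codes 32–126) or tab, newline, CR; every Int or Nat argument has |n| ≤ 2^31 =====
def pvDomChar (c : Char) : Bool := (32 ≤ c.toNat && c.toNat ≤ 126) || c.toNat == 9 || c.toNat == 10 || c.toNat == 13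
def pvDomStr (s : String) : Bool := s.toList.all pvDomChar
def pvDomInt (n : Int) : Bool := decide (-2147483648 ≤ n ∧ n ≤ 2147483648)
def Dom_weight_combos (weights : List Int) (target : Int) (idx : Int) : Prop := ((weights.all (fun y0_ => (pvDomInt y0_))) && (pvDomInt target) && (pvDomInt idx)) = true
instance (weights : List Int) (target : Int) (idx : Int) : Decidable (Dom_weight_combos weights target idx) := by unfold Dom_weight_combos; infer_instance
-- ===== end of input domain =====

-- B replaces A's top-down recursion by a bottom-up loop over range(len-1, idx-1, -1)
-- folding extensions onto result; same return value (objective: alternative decomposition).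

-- ===== PORT A =====
-- A's recursion on idx, made total with fuel; under Pre_ the fuel never runs out.
def weight_combos_go (weights : List Int) (target : Int) : Nat → Int → List (List Int)
  | 0, _ => [[]]
  | fuel + 1, idx =>
    if idx = (weights.length : Int) then [[]]
    else
      let empty := weight_combos_go weights target fuel (idx + 1)
      let notEmpty := empty.foldl (fun acc arr =>
        let copy := arr ++ [PySem.List.pyGetD weights idx 0]
        if copy.sum ≤ target then acc ++ [copy] else acc) []
      empty ++ notEmpty

def weight_combos (weights : List Int) (target : Int) (idx : Int) : List (List Int) :=
  weight_combos_go weights target (((weights.length : Int) - idx).toNat + 1) idx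

-- ===== PORT B =====
def weight_combos_alt (weights : List Int) (target : Int) (idx : Int) : List (List Int) :=
  (PySem.List.pyRange ((weights.length : Int) - 1) (idx - 1) (-1)).foldl
    (fun result i =>
      result ++ (result.filter (fun arr =>
        arr.sum + PySem.List.pyGetD weights i 0 ≤ target)).map
        (fun arr => arr ++ [PySem.List.pyGetD weights i 0]))
    [[]]

-- ===== PRECONDITION & SPEC =====
-- Pre_ excludes idx > len(weights) (A recurses forever: RecursionError) and
-- idx < -len(weights) (A hits an out-of-range index: IndexError).
def Pre_weight_combos (weights : List Int) (target : Int) (idx : Int) : Prop :=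
  -(weights.length : Int) ≤ idx ∧ idx ≤ (weights.length : Int)
instance (weights : List Int) (target : Int) (idx : Int) : Decidable (Pre_weight_combos weights target idx) := by unfold Pre_weight_combos; infer_instance

def pvWitness_weight_combos : List Int × Int × Int := ([1, 2, 3], 4, 0)

def Spec_weight_combos (weights : List Int) (target : Int) (idx : Int) (out : List (List Int)) : Prop := out = weight_combos_alt weights target idx
instance (weights : List Int) (target : Int) (idx : Int) (out : List (List Int)) : Decidable (Spec_weight_combos weights target idx out) := by unfold Spec_weight_combos; infer_instance

-- ===== CLAIM (what is proved, stated in full; the proofs are below) =====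
def Claim_equal_weight_combos : Prop := ∀ (weights : List Int) (target : Int) (idx : Int), Dom_weight_combos weights target idx → Pre_weight_combos weights target idx → Spec_weight_combos weights target idx (weight_combos weights target idx)

-- ===== LEMMAS AND PROOFS =====

-- the fold step of B, named for the proofs
def wcStep (weights : List Int) (target : Int) (result : List (List Int)) (i : Int) : List (List Int) :=
  result ++ (result.filter (fun arr =>
    arr.sum + PySem.List.pyGetD weights i 0 ≤ target)).map
    (fun arr => arr ++ [PySem.List.pyGetD weights i 0])

lemma wc_go_eq_fold (weights : List Int) (target : Int) :
    ∀ (fuel : Nat) (idx : Int), idx ≤ (weights.length : Int) →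
      ((weights.length : Int) - idx).toNat < fuel →
      weight_combos_go weights target fuel idx =
        (PySem.List.pyRange ((weights.length : Int) - 1) (idx - 1) (-1)).foldl
          (wcStep weights target) [[]] := by
  intro fuel
  induction fuel with
  | zero => intro idx _ h; omega
  | succ fuel ih =>
    intro idx hle hf
    by_cases heq : idx = (weights.length : Int)
    · subst heq
      rw [PySem.List.pyRange_neg_one_eq_nil (by omega)]
      simp [weight_combos_go]
    · have hlt : idx < (weights.length : Int) := lt_of_le_of_ne hle heq
      have hdecomp : PySem.List.pyRange ((weights.length : Int) - 1) (idx - 1) (-1) =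
          PySem.List.pyRange ((weights.length : Int) - 1) idx (-1) ++ [idx] := by
        rw [PySem.List.pyRange_neg_one_eq_reverse, PySem.List.pyRange_neg_one_eq_reverse]
        have h1 : (idx - 1) + 1 = idx := by omega
        have h2 : ((weights.length : Int) - 1) + 1 = (weights.length : Int) := by omega
        rw [h1, h2, PySem.List.pyRange_one_cons hlt]
        simp
      rw [hdecomp, List.foldl_append]
      have hrec := ih (idx + 1) (by omega) (by omega)
      simp only [weight_combos_go, if_neg heq]
      rw [PySem.List.foldl_append_ite]
      have h1 : (idx + 1) - 1 = idx := by omega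
      rw [h1] at hrec
      rw [hrec]
      simp only [List.foldl, wcStep]
      rw [List.nil_append]
      congr 1
      · congr 1
        apply List.filter_congr
        intro arr _
        simp [List.sum_append]

-- ===== VERDICT (by name: the statement is the Claim_ definition above) =====
theorem weight_combos_spec : Claim_equal_weight_combos := by
  intro weights target idx _ hpre
  unfold Spec_weight_combos weight_combos weight_combos_alt
  rw [wc_go_eq_fold weights target _ idx hpre.2 (by omega)]
  rfl
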